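-- pv_equiv track=rewrite | github.com/MCFpy/mcf | mcf/optpolicy_pt_eff_functions.py | all_combinations_no_complements_eff
-- ===== SOURCE A (Python) =====
-- from typing import TYPE_CHECKING, Sequence, TypeVar
--
-- T = TypeVar('T')
--
-- def all_combinations_no_complements_eff(values: Sequence[T]
--                                         ) -> list[tuple[T, ...]]:
--     """
--     Only emit subsets whose 'highest' element (values[n-1]) is absent.
--
--     That gives exactly (2^{n-1}-1) non‐empty, non‐full subsets.
--     """
--     n = len(values)
--     if n < 2:
--         return []
--     out: list[tuple[T, ...]] = []
--     # iterate masks 1 .. 2^{n-1}-1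
--     limit = 1 << (n - 1)
--     for mask in range(1, limit):
--         combo = []
--         m = mask
--         i = 0
--         while m:
--             if m & 1:
--                 combo.append(values[i])
--             i += 1
--             m >>= 1
--         out.append(tuple(combo))
--
--     return out
-- ===== SOURCE B (Python) =====
-- def all_combinations_no_complements_eff(values):
--     """
--     Only emit subsets whose 'highest' element (values[n-1]) is absent.
--
--     Incremental powerset doubling over values[:n-1]; drops the empty tuple.
--     """
--     n = len(values)
--     if n < 2:
--         return []
--     result = [()]
--     for x in values[:n - 1]:
--         result = result + [s + (x,) for s in result]
--     return result[1:]
-- ===== Notes on version B (the rewrite author's own statement) =====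
-- stated objective: simpler
-- what changed: Replaces the mask loop with inner bit-decoding by an incremental powerset doubling over values[:n-1] (result = result + [s+(x,) for s in result]), then drops the leading empty tuple.
import Mathlib
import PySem

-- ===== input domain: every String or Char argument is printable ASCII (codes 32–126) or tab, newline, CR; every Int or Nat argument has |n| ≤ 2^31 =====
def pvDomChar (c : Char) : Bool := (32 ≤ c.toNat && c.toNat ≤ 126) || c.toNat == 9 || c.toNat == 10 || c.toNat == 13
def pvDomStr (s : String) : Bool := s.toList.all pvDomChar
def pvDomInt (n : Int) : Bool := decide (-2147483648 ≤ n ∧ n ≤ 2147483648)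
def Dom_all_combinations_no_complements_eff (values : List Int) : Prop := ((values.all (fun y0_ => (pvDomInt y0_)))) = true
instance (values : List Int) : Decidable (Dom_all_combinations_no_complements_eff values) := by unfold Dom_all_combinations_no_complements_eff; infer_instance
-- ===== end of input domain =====

-- B replaces A's mask loop with inner bit-decoding by incremental powerset doubling
-- over values[:n-1], then drops the empty subset (objective: simpler).

-- ===== PORT A =====
-- the inner 'while m: if m & 1: combo.append(values[i]); i += 1; m >>= 1' loop;
-- values[i] is always in range here (i < bit-length of m < n), so the getD 0 default is never used
def pvDecA (values : List Int) (m i : Nat) : List Int :=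
  if h : m = 0 then []
  else
    (if m % 2 = 1 then [(PySem.List.pyGet? values (Int.ofNat i)).getD 0] else []) ++
      pvDecA values (m / 2) (i + 1)
termination_by m
decreasing_by exact Nat.div_lt_self (Nat.pos_of_ne_zero h) one_lt_two

def all_combinations_no_complements_eff (values : List Int) : List (List Int) :=
  let n := values.length
  if n < 2 then []
  else
    -- for mask in range(1, 1 << (n-1)): out.append(tuple(decode mask))
    (List.range (2 ^ (n - 1) - 1)).map (fun k => pvDecA values (k + 1) 0)

-- ===== PORT B =====
def all_combinations_no_complements_eff_alt (values : List Int) : List (List Int) :=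
  let n := values.length
  if n < 2 then []
  else
    -- result = [()]; for x in values[:n-1]: result = result + [s + (x,) for s in result]; return result[1:]
    ((values.take (n - 1)).foldl
      (fun r x => r ++ r.map (fun s => s ++ [x])) [[]]).drop 1

-- ===== PRECONDITION & SPEC =====
def Spec_all_combinations_no_complements_eff (values : List Int) (out : List (List Int)) : Prop := out = all_combinations_no_complements_eff_alt values
instance (values : List Int) (out : List (List Int)) : Decidable (Spec_all_combinations_no_complements_eff values out) := by unfold Spec_all_combinations_no_complements_eff; infer_instance

-- ===== CLAIM (what is proved, stated in full; the proofs are below) =====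
def Claim_equal_all_combinations_no_complements_eff : Prop := ∀ (values : List Int), Dom_all_combinations_no_complements_eff values → Spec_all_combinations_no_complements_eff values (all_combinations_no_complements_eff values)

-- ===== LEMMAS AND PROOFS =====

theorem pvDecA_zero (values : List Int) (i : Nat) : pvDecA values 0 i = [] := by
  rw [pvDecA]; simp

theorem pvDecA_step (values : List Int) (m i : Nat) :
    pvDecA values m i =
      (if m % 2 = 1 then [(PySem.List.pyGet? values (Int.ofNat i)).getD 0] else []) ++
        pvDecA values (m / 2) (i + 1) := by
  by_cases h : m = 0
  · subst h; simp [pvDecA_zero]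
  · rw [pvDecA]; simp [h]

theorem pvDecA_add_pow (values : List Int) (j : Nat) :
    ∀ k i, k < 2 ^ j →
      pvDecA values (k + 2 ^ j) i =
        pvDecA values k i ++ [(PySem.List.pyGet? values (Int.ofNat (i + j))).getD 0] := by
  induction j with
  | zero =>
    intro k i hk
    interval_cases k
    rw [pvDecA_step]
    simp [pvDecA_zero]
  | succ j ih =>
    intro k i hk
    have h2 : (0:Nat) < 2 ^ j := Nat.two_pow_pos _
    have hpow : 2 ^ (j + 1) = 2 ^ j + 2 ^ j := by ring
    rw [pvDecA_step]
    have hmod : (k + 2 ^ (j + 1)) % 2 = k % 2 := by omega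
    have hdiv : (k + 2 ^ (j + 1)) / 2 = k / 2 + 2 ^ j := by omega
    rw [hmod, hdiv, ih (k / 2) (i + 1) (by omega)]
    rw [pvDecA_step values k i]
    simp [List.append_assoc]
    have : ((i:Int) + 1 + (j:Int)) = (i:Int) + ((j:Int) + 1) := by ring
    rw [this]

theorem pvFold_spec (values : List Int) :
    ∀ t, t ≤ values.length →
      (values.take t).foldl (fun r x => r ++ r.map (fun s => s ++ [x])) [[]] =
        (List.range (2 ^ t)).map (fun k => pvDecA values k 0) := by
  intro t
  induction t with
  | zero => intro _; simp [pvDecA_zero]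
  | succ t ih =>
    intro ht
    have htlt : t < values.length := by omega
    rw [List.take_add_one, List.foldl_append, ih (by omega)]
    have hx : values[t]?.toList = [values[t]] := by
      simp [List.getElem?_eq_getElem htlt]
    rw [hx]
    simp only [List.foldl_cons, List.foldl_nil]
    have hpow : 2 ^ (t + 1) = 2 ^ t + 2 ^ t := by ring
    rw [hpow, List.range_add, List.map_append, List.map_map, List.map_map]
    congr 1
    apply List.map_congr_left
    intro k hk
    have hk' : k < 2 ^ t := List.mem_range.mp hk
    have := pvDecA_add_pow values t k 0 hk'
    simp only [Function.comp_apply]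
    rw [Nat.add_comm (2 ^ t) k, this]
    congr 2
    simp [PySem.List.pyGet?_natCast, List.getElem?_eq_getElem htlt]

-- ===== VERDICT (by name: the statement is the Claim_ definition above) =====
theorem all_combinations_no_complements_eff_spec : Claim_equal_all_combinations_no_complements_eff := by
  intro values _
  unfold Spec_all_combinations_no_complements_eff
  unfold all_combinations_no_complements_eff all_combinations_no_complements_eff_alt
  by_cases h : values.length < 2
  · simp [h]
  · simp only [h, if_false]
    rw [pvFold_spec values (values.length - 1) (by omega)]
    have hpos : 0 < 2 ^ (values.length - 1) := Nat.two_pow_pos _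
    have h2 : 2 ^ (values.length - 1) = (2 ^ (values.length - 1) - 1) + 1 := by omega
    rw [h2, List.range_succ_eq_map]
    simp [List.map_map, Function.comp, Nat.add_comm]
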